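-- pv_equiv track=rewrite | github.com/esev249/Emese | detect_pt.py | get_tonic
-- ===== SOURCE A (Python) =====
-- def get_tonic(rem_start, rem_end, phasic):
--   tonic_seg = []
--   current_start = rem_start
--
--   for ph_start, ph_end in phasic:
--     # A gap between current start and start of a phasic episode
--     if current_start < ph_start:
--       tonic_seg.append((current_start, ph_start))
--
--     # Update current start
--     current_start = max(current_start, ph_end)
--
--   # After the last phasic episode there might be a remaining tonic episode
--   if current_start < rem_end:
--     tonic_seg.append((current_start, rem_end))
--
--   return tonic_seg
-- ===== SOURCE B (Python) =====
-- def get_tonic(rem_start, rem_end, phasic):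
--     # Two-pass decomposition: build the prefix-maximum frontier table first,
--     # then emit gaps in a separate comprehension pass.
--     fronts = [rem_start]
--     for _, ph_end in phasic:
--         fronts.append(max(fronts[-1], ph_end))
--     gaps = [(f, s) for f, (s, _) in zip(fronts, phasic) if f < s]
--     if fronts[-1] < rem_end:
--         gaps.append((fronts[-1], rem_end))
--     return gaps
-- ===== Notes on version B (the rewrite author's own statement) =====
-- stated objective: alternative
-- what changed: Replaced the single interleaved loop (which both emits gaps and updates the frontier) by a two-pass decomposition: first build the prefix-maximum frontier table, then emit gaps by zipping frontiers with intervals in a comprehension, finishing with the last frontier against rem_end.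
import Mathlib
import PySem

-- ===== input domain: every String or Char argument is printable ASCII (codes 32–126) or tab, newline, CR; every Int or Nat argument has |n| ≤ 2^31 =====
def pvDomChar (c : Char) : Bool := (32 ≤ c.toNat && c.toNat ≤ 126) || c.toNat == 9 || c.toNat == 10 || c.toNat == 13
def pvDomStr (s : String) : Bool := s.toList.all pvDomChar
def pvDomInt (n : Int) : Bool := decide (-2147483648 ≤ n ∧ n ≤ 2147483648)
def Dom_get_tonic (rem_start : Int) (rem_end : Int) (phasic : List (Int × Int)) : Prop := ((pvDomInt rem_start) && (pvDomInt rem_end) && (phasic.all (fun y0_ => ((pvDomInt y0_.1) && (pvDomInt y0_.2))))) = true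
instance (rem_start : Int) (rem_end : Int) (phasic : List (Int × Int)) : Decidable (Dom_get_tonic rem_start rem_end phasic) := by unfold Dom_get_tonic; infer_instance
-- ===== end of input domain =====

-- B replaces the interleaved emit-and-update loop by a prefix-maximum frontier table plus a separate gap-emission pass (alternative decomposition, same cost).

-- ===== PORT A =====
def get_tonic (rem_start : Int) (rem_end : Int) (phasic : List (Int × Int)) : List (Int × Int) :=
  let st := phasic.foldl (fun (st : List (Int × Int) × Int) p =>
    let st1 := if st.2 < p.1 then (st.1 ++ [(st.2, p.1)], st.2) else st
    (st1.1, max st1.2 p.2)) ([], rem_start)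
  if st.2 < rem_end then st.1 ++ [(st.2, rem_end)] else st.1

-- ===== PORT B =====
-- frontier table: fronts = [rem_start] then append max(fronts[-1], ph_end) per interval
def pvFronts (cur : Int) : List (Int × Int) → List Int
  | [] => [cur]
  | p :: rest => cur :: pvFronts (max cur p.2) rest

def get_tonic_alt (rem_start : Int) (rem_end : Int) (phasic : List (Int × Int)) : List (Int × Int) :=
  let fronts := pvFronts rem_start phasic
  let gaps := (fronts.zip phasic).filterMap
    (fun fp => if fp.1 < fp.2.1 then some (fp.1, fp.2.1) else none)
  if fronts.getLastD rem_start < rem_end then gaps ++ [(fronts.getLastD rem_start, rem_end)] else gaps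

-- ===== PRECONDITION & SPEC =====
def Spec_get_tonic (rem_start : Int) (rem_end : Int) (phasic : List (Int × Int)) (out : List (Int × Int)) : Prop := out = get_tonic_alt rem_start rem_end phasic
instance (rem_start : Int) (rem_end : Int) (phasic : List (Int × Int)) (out : List (Int × Int)) : Decidable (Spec_get_tonic rem_start rem_end phasic out) := by unfold Spec_get_tonic; infer_instance

-- ===== CLAIM (what is proved, stated in full; the proofs are below) =====
def Claim_equal_get_tonic : Prop := ∀ (rem_start : Int) (rem_end : Int) (phasic : List (Int × Int)), Dom_get_tonic rem_start rem_end phasic → Spec_get_tonic rem_start rem_end phasic (get_tonic rem_start rem_end phasic)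

-- ===== LEMMAS AND PROOFS =====

lemma pvFronts_ne_nil (cur : Int) (l : List (Int × Int)) : pvFronts cur l ≠ [] := by
  cases l <;> simp [pvFronts]

lemma pvFronts_getLastD (cur : Int) (l : List (Int × Int)) (d₁ d₂ : Int) :
    (pvFronts cur l).getLastD d₁ = (pvFronts cur l).getLastD d₂ := by
  have h := pvFronts_ne_nil cur l
  cases hl : pvFronts cur l with
  | nil => exact absurd hl h
  | cons a t =>
      simp [List.getLastD_eq_getLast?, List.getLast?_eq_some_getLast (l := a :: t) (by simp)]

lemma get_tonic_key (l : List (Int × Int)) :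
    ∀ (acc : List (Int × Int)) (cur re : Int),
    (let st := l.foldl (fun (st : List (Int × Int) × Int) p =>
        let st1 := if st.2 < p.1 then (st.1 ++ [(st.2, p.1)], st.2) else st
        (st1.1, max st1.2 p.2)) (acc, cur)
     if st.2 < re then st.1 ++ [(st.2, re)] else st.1)
    = acc ++
      (let fronts := pvFronts cur l
       let gaps := (fronts.zip l).filterMap
         (fun fp => if fp.1 < fp.2.1 then some (fp.1, fp.2.1) else none)
       if fronts.getLastD cur < re then gaps ++ [(fronts.getLastD cur, re)] else gaps) := by
  induction l with
  | nil =>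
      intro acc cur re
      simp only [List.foldl_nil, pvFronts, List.zip_nil_right, List.filterMap_nil,
        List.getLastD_cons, List.getLastD_nil]
      split <;> simp_all
  | cons p rest ih =>
      intro acc cur re
      simp only [List.foldl_cons, pvFronts, List.zip_cons_cons, List.filterMap_cons,
        List.getLastD_cons]
      rw [pvFronts_getLastD (max cur p.2) rest cur (max cur p.2)]
      by_cases h : cur < p.1
      · simp only [h, if_pos]
        rw [ih (acc ++ [(cur, p.1)]) (max cur p.2) re]
        split <;> simp_all [List.append_assoc, List.getLastD_eq_getLast?]
      · simp only [h, if_false]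
        rw [ih acc (max cur p.2) re]

-- ===== VERDICT (by name: the statement is the Claim_ definition above) =====
theorem get_tonic_spec : Claim_equal_get_tonic := by
  intro rs re ph _
  show get_tonic rs re ph = get_tonic_alt rs re ph
  have h := get_tonic_key ph [] rs re
  simpa [get_tonic, get_tonic_alt] using h
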